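-- pv_equiv track=rewrite | github.com/Yan-Zhelanov/algorithms | sprint_4/2_review/a_search_system.py | search
-- ===== SOURCE A (Python) =====
-- def search(docs, requests):
--     docs_words = []
--     for index in range(len(docs)):
--         docs_words.append({})
--         for word in docs[index].split():
--             docs_words[index][word] = docs_words[index].get(word, 0) + 1
--     result = []
--     for request_index in range(len(requests)):
--         result.append({index: 0 for index in range(len(docs))})
--         for index in range(len(docs)):
--             for word in set(requests[request_index].split()):
--                 if word in docs_words[index]:
--                     result[request_index][index] += docs_words[index][word]
--     result = [
--         [item[0]+1 for item in sorted(
--             result[index].items(), key=lambda item: (-item[1], item[0])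
--         ) if item[1] > 0]
--         for index in range(len(result))
--     ]
--     return '\n'.join(
--         ' '.join(str(element[index]) for index in range(5))
--         if len(element) >= 5
--         else ' '.join(str(element[index]) for index in range(len(element)))
--         for element in result
--     )
-- ===== SOURCE B (Python) =====
-- def search(docs, requests):
--     # Inverted index: word -> {doc_id: count}; per request accumulate scores
--     # only over matching docs, then sort just those and take the top 5.
--     inverted = {}
--     for doc_id, doc in enumerate(docs):
--         for word in doc.split():
--             counts = inverted.get(word, {})
--             counts[doc_id] = counts.get(doc_id, 0) + 1
--             inverted[word] = counts
--     lines = []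
--     for request in requests:
--         scores = {}
--         for word in set(request.split()):
--             for doc_id, count in inverted.get(word, {}).items():
--                 scores[doc_id] = scores.get(doc_id, 0) + count
--         top = sorted(scores.items(), key=lambda item: (-item[1], item[0]))[:5]
--         lines.append(' '.join(str(doc_id + 1) for doc_id, _ in top))
--     return '\n'.join(lines)
-- ===== Notes on version B (the rewrite author's own statement) =====
-- stated objective: faster
-- what changed: Replaces the per-request scan over every document (and its index-keyed zero-filled dict) with an inverted index word->doc counts built once, so each request accumulates scores only for matching documents and sorts just those, taking the top 5.
import Mathlib
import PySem

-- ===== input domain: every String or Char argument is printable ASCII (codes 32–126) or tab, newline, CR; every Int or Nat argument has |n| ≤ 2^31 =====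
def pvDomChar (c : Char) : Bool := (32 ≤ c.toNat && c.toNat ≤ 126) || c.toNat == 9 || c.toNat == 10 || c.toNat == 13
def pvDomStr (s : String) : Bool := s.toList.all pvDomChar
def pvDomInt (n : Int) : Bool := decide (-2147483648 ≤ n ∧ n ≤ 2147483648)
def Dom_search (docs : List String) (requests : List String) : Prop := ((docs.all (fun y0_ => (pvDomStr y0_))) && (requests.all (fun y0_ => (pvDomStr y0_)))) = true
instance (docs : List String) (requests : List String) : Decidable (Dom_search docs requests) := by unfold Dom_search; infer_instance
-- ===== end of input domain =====

-- ===== PORT A =====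
-- B replaces A's per-request scan over every document with an inverted index built once.
def search (docs : List String) (requests : List String) : String :=
  let docsWords : List (PySem.Dict String Int) :=
    (PySem.List.pyRange 0 (PySem.List.len docs) 1).foldl (fun dw index =>
      let dw := dw ++ [PySem.Dict.empty]
      (PySem.Str.split₀ (PySem.List.pyGetD docs index "")).foldl (fun dw word =>
        PySem.List.pySetD dw index
          ((PySem.List.pyGetD dw index PySem.Dict.empty).insert word
            ((PySem.List.pyGetD dw index PySem.Dict.empty).getD word 0 + 1))) dw) []
  let result : List (PySem.Dict Int Int) :=
    (PySem.List.pyRange 0 (PySem.List.len requests) 1).foldl (fun res ri =>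
      let res := res ++ [(PySem.List.pyRange 0 (PySem.List.len docs) 1).foldl
        (fun d i => d.insert i 0) PySem.Dict.empty]
      (PySem.List.pyRange 0 (PySem.List.len docs) 1).foldl (fun res index =>
        (PySem.Set.ofList (PySem.Str.split₀ (PySem.List.pyGetD requests ri ""))).foldl (fun res word =>
          if (PySem.List.pyGetD docsWords index PySem.Dict.empty).contains word then
            PySem.List.pySetD res ri
              ((PySem.List.pyGetD res ri PySem.Dict.empty).insert index
                ((PySem.List.pyGetD res ri PySem.Dict.empty).getD index 0 +
                  (PySem.List.pyGetD docsWords index PySem.Dict.empty).getD word 0))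
          else res) res) res) []
  let result2 : List (List Int) :=
    (PySem.List.pyRange 0 (PySem.List.len result) 1).map (fun index =>
      ((PySem.List.sorted2 (PySem.List.pyGetD result index PySem.Dict.empty).items
          (fun item => -item.2) (fun item => item.1)).filter
        (fun item => item.2 > 0)).map (fun item => item.1 + 1))
  PySem.Str.join "\n" (result2.map (fun element =>
    if 5 ≤ element.length then
      PySem.Str.join " " ((PySem.List.pyRange 0 5 1).map
        (fun i => PySem.Int.toStr (PySem.List.pyGetD element i 0)))
    else
      PySem.Str.join " " ((PySem.List.pyRange 0 (PySem.List.len element) 1).map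
        (fun i => PySem.Int.toStr (PySem.List.pyGetD element i 0)))))

-- ===== PORT B =====
def search_alt (docs : List String) (requests : List String) : String :=
  let inverted : PySem.Dict String (PySem.Dict Int Int) :=
    (PySem.List.enumerate docs).foldl (fun inv p =>
      (PySem.Str.split₀ p.2).foldl (fun inv word =>
        inv.modify word PySem.Dict.empty (fun d => d.insert p.1 (d.getD p.1 0 + 1))) inv)
      PySem.Dict.empty
  let lines : List String := requests.map (fun request =>
    let scores : PySem.Dict Int Int :=
      (PySem.Set.ofList (PySem.Str.split₀ request)).foldl (fun sc word =>
        ((inverted.getD word PySem.Dict.empty).items).foldl (fun sc q =>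
          sc.insert q.1 (sc.getD q.1 0 + q.2)) sc) PySem.Dict.empty
    let top := (PySem.List.sorted2 scores.items (fun item => -item.2) (fun item => item.1)).take 5
    PySem.Str.join " " (top.map (fun q => PySem.Int.toStr (q.1 + 1))))
  PySem.Str.join "\n" lines

-- ===== PRECONDITION & SPEC =====
def Spec_search (docs : List String) (requests : List String) (out : String) : Prop := out = search_alt docs requests
instance (docs : List String) (requests : List String) (out : String) : Decidable (Spec_search docs requests out) := by unfold Spec_search; infer_instance

-- ===== CLAIM (what is proved, stated in full; the proofs are below) =====
def Claim_equal_search : Prop := ∀ (docs : List String) (requests : List String), Dom_search docs requests → Spec_search docs requests (search docs requests)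

-- ===== LEMMAS AND PROOFS =====

lemma pyGetD_append_last {β : Type} (pre : List β) (d dflt : β) :
    PySem.List.pyGetD (pre ++ [d]) ((pre.length : Int)) dflt = d := by
  simp [PySem.List.pyGetD_natCast, List.getD]

lemma pySetD_append_last {β : Type} (pre : List β) (d v : β) :
    PySem.List.pySetD (pre ++ [d]) ((pre.length : Int)) v = pre ++ [v] := by
  simp [PySem.List.pySetD_natCast]

lemma foldl_lastSlot {β γ : Type} (body : List β → γ → List β) (G : β → γ → β) (pre : List β) :
    ∀ (l : List γ) (d0 : β), (∀ d x, x ∈ l → body (pre ++ [d]) x = pre ++ [G d x]) →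
      l.foldl body (pre ++ [d0]) = pre ++ [l.foldl G d0]
  | [], d0, _ => rfl
  | a :: t, d0, h => by
      simp only [List.foldl_cons]
      rw [h d0 a (List.mem_cons_self ..)]
      exact foldl_lastSlot body G pre t _ (fun d x hx => h d x (List.mem_cons_of_mem _ hx))

lemma foldl_pyRange_build {α β : Type} (xs : List α) (g : α → β) (step : List β → Int → List β)
    (h : ∀ (acc : List β) (k : Nat) (hk : k < xs.length), acc.length = k →
        step acc (k : Int) = acc ++ [g xs[k]]) :
    (PySem.List.pyRange 0 (xs.length : Int) 1).foldl step [] = xs.map g := by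
  have aux : ∀ (n : Nat), n ≤ xs.length →
      (PySem.List.pyRange 0 (n : Int) 1).foldl step [] = (xs.take n).map g := by
    intro n
    induction n with
    | zero => intro _; simp [PySem.List.pyRange_one_eq_nil]
    | succ m ih =>
      intro hm
      have h1 : ((m + 1 : Nat) : Int) = (m : Int) + 1 := by push_cast; ring
      rw [h1, PySem.List.pyRange_one_succ_right (by positivity), List.foldl_append]
      rw [ih (by omega)]
      have hlen : ((xs.take m).map g).length = m := by
        simp [List.length_take]; omega
      simp only [List.foldl_cons, List.foldl_nil]
      rw [h _ m (by omega) hlen]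
      rw [List.take_succ_eq_append_getElem (show m < xs.length by omega)]
      simp only [List.map_append, List.map_cons, List.map_nil]
  have := aux xs.length le_rfl
  simpa using this

lemma zeroFold_getD : ∀ (l : List Int) (d : PySem.Dict Int Int), (∀ j', d.getD j' 0 = 0) →
    ∀ j, (l.foldl (fun d i => d.insert i 0) d).getD j 0 = 0
  | [], d, hd, j => hd j
  | a :: t, d, hd, j => by
      simp only [List.foldl_cons]
      exact zeroFold_getD t _ (fun j' => by rw [PySem.Dict.getD_insert]; split <;> simp [hd]) j

lemma wordFold_getD (c : String → Bool) (m : String → Int) (i : Int) :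
    ∀ (S : List String) (d : PySem.Dict Int Int) (j : Int),
    (S.foldl (fun d w => if c w then d.insert i (d.getD i 0 + m w) else d) d).getD j 0
      = d.getD j 0 + (if j = i then ((S.filter c).map m).sum else 0)
  | [], d, j => by simp
  | w :: t, d, j => by
      simp only [List.foldl_cons]
      by_cases hc : c w
      · rw [if_pos hc, wordFold_getD c m i t _ j, PySem.Dict.getD_insert]
        by_cases hj : j = i
        · subst hj; simp [hc]; ring
        · simp [hj]
      · rw [if_neg hc, wordFold_getD c m i t _ j]
        simp [hc]

lemma wordFold_keys (c : String → Bool) (m : String → Int) (i : Int) :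
    ∀ (S : List String) (d : PySem.Dict Int Int), i ∈ d.keys →
    (S.foldl (fun d w => if c w then d.insert i (d.getD i 0 + m w) else d) d).keys = d.keys
  | [], d, _ => rfl
  | w :: t, d, hi => by
      simp only [List.foldl_cons]
      by_cases hc : c w
      · have hki := PySem.Dict.keys_insert_of_contains d (d.getD i 0 + m w)
          ((PySem.Dict.contains_iff_mem_keys d i).2 hi)
        rw [if_pos hc, wordFold_keys c m i t _ (by rw [hki]; exact hi), hki]
      · rw [if_neg hc]
        exact wordFold_keys c m i t _ hi

lemma idxFold_getD (C : Int → String → Bool) (M : Int → String → Int) (S : List String) :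
    ∀ (idxl : List Int), idxl.Nodup → ∀ (d : PySem.Dict Int Int), (∀ i ∈ idxl, i ∈ d.keys) → ∀ j,
    (idxl.foldl (fun d i => S.foldl (fun d w => if C i w then d.insert i (d.getD i 0 + M i w) else d) d) d).getD j 0
      = d.getD j 0 + (if j ∈ idxl then ((S.filter (C j)).map (M j)).sum else 0)
  | [], _, d, _, j => by simp
  | i :: t, hnd, d, hk, j => by
      simp only [List.foldl_cons]
      have hkeys := wordFold_keys (C i) (M i) i S d (hk i (List.mem_cons_self ..))
      rw [idxFold_getD C M S t (List.nodup_cons.1 hnd).2 _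
            (fun i' hi' => by rw [hkeys]; exact hk i' (List.mem_cons_of_mem _ hi')) j]
      rw [wordFold_getD]
      by_cases hj : j = i
      · subst hj
        have : j ∉ t := (List.nodup_cons.1 hnd).1
        simp [this]
      · simp [hj]

lemma idxFold_keys (C : Int → String → Bool) (M : Int → String → Int) (S : List String) :
    ∀ (idxl : List Int) (d : PySem.Dict Int Int), (∀ i ∈ idxl, i ∈ d.keys) →
    (idxl.foldl (fun d i => S.foldl (fun d w => if C i w then d.insert i (d.getD i 0 + M i w) else d) d) d).keys = d.keys
  | [], d, _ => rfl
  | i :: t, d, hk => by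
      simp only [List.foldl_cons]
      have hkeys := wordFold_keys (C i) (M i) i S d (hk i (List.mem_cons_self ..))
      rw [idxFold_keys C M S t _ (fun i' hi' => by rw [hkeys]; exact hk i' (List.mem_cons_of_mem _ hi')), hkeys]

lemma pairFold_getD : ∀ (L : List (Int × Int)) (sc : PySem.Dict Int Int) (j : Int),
    (L.foldl (fun sc q => sc.insert q.1 (sc.getD q.1 0 + q.2)) sc).getD j 0
      = sc.getD j 0 + ((L.filter (fun q => q.1 == j)).map (·.2)).sum
  | [], sc, j => by simp
  | q :: t, sc, j => by
      simp only [List.foldl_cons]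
      rw [pairFold_getD t _ j, PySem.Dict.getD_insert]
      by_cases hj : j = q.1
      · simp [hj.symm]; ring
      · have hb : (q.1 == j) = false := by
          simp only [beq_eq_false_iff_ne, ne_eq]
          exact fun h => hj h.symm
        simp [hj, hb]

lemma invWords_getD (id : Int) :
    ∀ (ws : List String) (inv : PySem.Dict String (PySem.Dict Int Int)) (w : String),
    (ws.foldl (fun inv word => inv.modify word PySem.Dict.empty
        (fun d => d.insert id (d.getD id 0 + 1))) inv).getD w PySem.Dict.empty
      = if 0 < List.count w ws then
          ((inv.getD w PySem.Dict.empty).insert id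
            ((inv.getD w PySem.Dict.empty).getD id 0 + (List.count w ws : Int)))
        else inv.getD w PySem.Dict.empty
  | [], inv, w => by simp
  | a :: t, inv, w => by
      simp only [List.foldl_cons]
      rw [invWords_getD id t _ w, PySem.Dict.getD_modify]
      by_cases hw : w = a
      · subst hw
        rw [if_pos rfl]
        by_cases hc : 0 < List.count w t
        · rw [if_pos hc, if_pos (by simp)]
          rw [PySem.Dict.insert_insert_self, PySem.Dict.getD_insert, if_pos rfl]
          congr 1
          simp only [List.count_cons_self]
          push_cast
          ring
        · rw [if_neg hc, if_pos (by simp)]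
          congr 1
          have h0 : List.count w t = 0 := by omega
          simp [h0]
      · rw [if_neg hw]
        have hw' : ¬(a = w) := fun h => hw h.symm
        have : List.count w (a :: t) = List.count w t := by
          simp [hw']
        rw [this]

lemma boolLex (k1a k1b k2a k2b : Int) :
    (decide (k1a < k1b) || (!decide (k1b < k1a) && decide (k2a < k2b)))
      = decide ((toLex (k1a, k2a)) < toLex (k1b, k2b)) := by
  apply Bool.eq_iff_iff.mpr
  simp only [Bool.or_eq_true, Bool.and_eq_true, Bool.not_eq_true', decide_eq_true_eq,
    decide_eq_false_iff_not, Prod.Lex.lt_iff, ofLex_toLex]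
  omega

lemma enum_filter_fst {α : Type} :
    ∀ (xs : List α) (s j : Int),
    (PySem.List.enumerate xs s).filter (fun p => p.1 == j)
      = if h : s ≤ j ∧ j < s + xs.length then [(j, xs[(j - s).toNat]'(by omega))] else []
  | [], s, j => by simp
  | x :: t, s, j => by
      rw [PySem.List.enumerate_cons, List.filter_cons]
      by_cases hj : s = j
      · subst hj
        rw [if_pos (by simp)]
        rw [enum_filter_fst t (s+1) s]
        rw [dif_neg (by omega), dif_pos (by simp only [List.length_cons]; push_cast; omega)]
        simp
      · have hb : ((s, x).1 == j) = false := by simpa using hj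
        rw [hb, if_neg (by simp)]
        rw [enum_filter_fst t (s+1) j]
        by_cases h2 : s + 1 ≤ j ∧ j < s + 1 + t.length
        · rw [dif_pos h2, dif_pos (by simp only [List.length_cons]; push_cast; omega)]
          congr 1
          congr 1
          rw [List.getElem_cons, dif_neg (by omega)]
          congr 1
          omega
        · rw [dif_neg h2, dif_neg (by simp only [List.length_cons]; push_cast; omega)]

lemma sorted2_eq_sorted_toLex (xs : List (Int × Int)) (k1 k2 : Int × Int → Int)
    (hb : ∀ a b, (decide (k1 a < k1 b) || (!decide (k1 b < k1 a) && decide (k2 a < k2 b)))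
      = decide ((toLex (k1 a, k2 a)) < toLex (k1 b, k2 b))) :
    PySem.List.sorted2 xs k1 k2 = PySem.List.sorted xs (fun x => toLex (k1 x, k2 x)) := by
  simp only [PySem.List.sorted2, PySem.List.sorted]
  congr 1
  funext acc x
  congr 1
  funext a b
  exact hb a b

lemma sum_pos_of_mem {l : List Int} (h0 : ∀ x ∈ l, 0 ≤ x) {y : Int} (hy : y ∈ l) (hpos : 0 < y) :
    0 < l.sum := by
  induction l with
  | nil => cases hy
  | cons a t ih =>
    rw [List.sum_cons]
    rcases List.mem_cons.1 hy with h | h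
    · subst h
      have : 0 ≤ t.sum := List.sum_nonneg (fun x hx => h0 x (List.mem_cons_of_mem _ hx))
      omega
    · have h1 : 0 < t.sum := ih (fun x hx => h0 x (List.mem_cons_of_mem _ hx)) h
      have h2 := h0 a (List.mem_cons_self ..)
      omega

lemma map_pyGetD_take (f : Int → String) :
    ∀ (k : Nat) (elt : List Int), k ≤ elt.length →
    (PySem.List.pyRange 0 (k : Int) 1).map (fun i => f (PySem.List.pyGetD elt i 0))
      = (elt.take k).map f := by
  intro k
  induction k with
  | zero => intro elt _; simp [PySem.List.pyRange_one_eq_nil]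
  | succ m ih =>
    intro elt hm
    have h1 : ((m + 1 : Nat) : Int) = (m : Int) + 1 := by push_cast; ring
    rw [h1, PySem.List.pyRange_one_succ_right (by positivity), List.map_append, ih elt (by omega)]
    rw [List.take_succ_eq_append_getElem (show m < elt.length by omega), List.map_append]
    congr 1
    simp [PySem.List.pyGetD_natCast, List.getD, List.getElem?_eq_getElem (show m < elt.length by omega)]

-- ===== spec-level definitions =====
def dwMap (docs : List String) : List (PySem.Dict String Int) :=
  docs.map (fun s => PySem.Dict.counter (PySem.Str.split₀ s))

def zdict (n : Int) : PySem.Dict Int Int :=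
  (PySem.List.pyRange 0 n 1).foldl (fun d i => d.insert i 0) PySem.Dict.empty

def scoreAt (docs : List String) (r : String) (j : Int) : Int :=
  ((PySem.Set.ofList (PySem.Str.split₀ r)).map
    (fun w => ((List.count w (PySem.Str.split₀ (docs.getD j.toNat ""))) : Int))).sum

def itemsSpec (docs : List String) (r : String) : List (Int × Int) :=
  (PySem.List.pyRange 0 (docs.length : Int) 1).map (fun j => (j, scoreAt docs r j))

def perDict (docs : List String) (r : String) : PySem.Dict Int Int :=
  (PySem.List.pyRange 0 (docs.length : Int) 1).foldl (fun d index =>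
    (PySem.Set.ofList (PySem.Str.split₀ r)).foldl (fun d word =>
      if (PySem.List.pyGetD (dwMap docs) index PySem.Dict.empty).contains word then
        d.insert index (d.getD index 0 +
          (PySem.List.pyGetD (dwMap docs) index PySem.Dict.empty).getD word 0)
      else d) d) (zdict (docs.length : Int))

-- ===== A-side characterization =====
lemma docsWords_eq (docs : List String) :
    (PySem.List.pyRange 0 ((docs.length : Int)) 1).foldl (fun dw index =>
      (PySem.Str.split₀ (PySem.List.pyGetD docs index "")).foldl (fun dw word =>
        PySem.List.pySetD dw index
          ((PySem.List.pyGetD dw index PySem.Dict.empty).insert word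
            ((PySem.List.pyGetD dw index PySem.Dict.empty).getD word 0 + 1)))
        (dw ++ [PySem.Dict.empty])) []
    = dwMap docs := by
  apply foldl_pyRange_build
  intro acc k hk hlen
  rw [PySem.List.pyGetD_natCast, List.getD_eq_getElem _ _ hk]
  rw [foldl_lastSlot _ (fun d w => d.insert w (d.getD w 0 + 1)) acc _ _
    (fun d x _ => by
      rw [show ((k : Int)) = (acc.length : Int) by rw [hlen],
        pyGetD_append_last, pySetD_append_last])]
  rw [PySem.Dict.foldl_insert_getD_add_one_eq_counter]

lemma result_eq (docs requests : List String) :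
    (PySem.List.pyRange 0 (requests.length : Int) 1).foldl (fun res ri =>
      (PySem.List.pyRange 0 (docs.length : Int) 1).foldl (fun res index =>
        (PySem.Set.ofList (PySem.Str.split₀ (PySem.List.pyGetD requests ri ""))).foldl (fun res word =>
          if (PySem.List.pyGetD (dwMap docs) index PySem.Dict.empty).contains word then
            PySem.List.pySetD res ri
              ((PySem.List.pyGetD res ri PySem.Dict.empty).insert index
                ((PySem.List.pyGetD res ri PySem.Dict.empty).getD index 0 +
                  (PySem.List.pyGetD (dwMap docs) index PySem.Dict.empty).getD word 0))
          else res) res)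
        (res ++ [zdict (docs.length : Int)])) []
    = requests.map (perDict docs) := by
  apply foldl_pyRange_build
  intro acc k hk hlen
  rw [PySem.List.pyGetD_natCast, List.getD_eq_getElem _ _ hk]
  rw [foldl_lastSlot _ (fun d index =>
      (PySem.Set.ofList (PySem.Str.split₀ requests[k])).foldl (fun d word =>
        if (PySem.List.pyGetD (dwMap docs) index PySem.Dict.empty).contains word then
          d.insert index (d.getD index 0 +
            (PySem.List.pyGetD (dwMap docs) index PySem.Dict.empty).getD word 0)
        else d) d) acc _ _
    (fun d index _ => by
      rw [foldl_lastSlot _ (fun d word =>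
          if (PySem.List.pyGetD (dwMap docs) index PySem.Dict.empty).contains word then
            d.insert index (d.getD index 0 +
              (PySem.List.pyGetD (dwMap docs) index PySem.Dict.empty).getD word 0)
          else d) acc _ _
        (fun d' word _ => by
          by_cases hc : (PySem.List.pyGetD (dwMap docs) index PySem.Dict.empty).contains word = true
          · simp only [hc, if_true]
            rw [show ((k : Int)) = (acc.length : Int) by rw [hlen],
              pyGetD_append_last, pySetD_append_last]
          · have hc' : (PySem.List.pyGetD (dwMap docs) index PySem.Dict.empty).contains word = false := by
              simpa using hc
            simp only [hc', Bool.false_eq_true, if_false])])]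
  rfl

lemma getD_zdict (n j : Int) : (zdict n).getD j 0 = 0 :=
  zeroFold_getD _ _ (fun j' => by simp) j

lemma keys_zdict (n : Int) : (zdict n).keys = PySem.List.pyRange 0 n 1 := by
  unfold zdict
  rw [PySem.Dict.keys_foldl_insert _ (fun _ _ => 0)]
  rw [PySem.Dict.keys_empty]
  show PySem.Set.update [] _ = _
  rw [PySem.Set.update_nil_left]
  exact PySem.Set.ofList_eq_self_of_nodup _ (PySem.List.nodup_pyRange_one _ _)

lemma dw_at (docs : List String) (j : Int) (h0 : 0 ≤ j) (h1 : j < (docs.length : Int)) :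
    PySem.List.pyGetD (dwMap docs) j PySem.Dict.empty
      = PySem.Dict.counter (PySem.Str.split₀ (docs.getD j.toNat "")) := by
  rw [show j = ((j.toNat : Nat) : Int) by omega, PySem.List.pyGetD_natCast]
  unfold dwMap
  rw [List.getD_eq_getElem _ _ (by simp; omega), List.getElem_map,
    List.getD_eq_getElem _ _ (by omega)]
  congr 1

lemma sum_filter_counter (ws : List String) :
    ∀ (S : List String),
    ((S.filter (fun w => (PySem.Dict.counter ws).contains w)).map
      (fun w => (PySem.Dict.counter ws).getD w 0)).sum
    = (S.map (fun w => ((List.count w ws) : Int))).sum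
  | [] => by simp
  | w :: t => by
      rw [List.filter_cons]
      by_cases hc : (PySem.Dict.counter ws).contains w
      · rw [if_pos hc]
        simp only [List.map_cons, List.sum_cons]
        rw [sum_filter_counter ws t, PySem.Dict.getD_counter]
      · rw [if_neg hc]
        have hm : List.count w ws = 0 := by
          rw [PySem.Dict.contains_counter] at hc
          simp only [List.contains_eq_mem, Bool.not_eq_true, decide_eq_false_iff_not] at hc
          exact List.count_eq_zero.2 hc
        simp only [List.map_cons, List.sum_cons, sum_filter_counter ws t, hm]
        simp

lemma perDict_getD (docs : List String) (r : String) (j : Int) :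
    (perDict docs r).getD j 0
      = if 0 ≤ j ∧ j < (docs.length : Int) then scoreAt docs r j else 0 := by
  unfold perDict
  rw [idxFold_getD (fun i w => (PySem.List.pyGetD (dwMap docs) i PySem.Dict.empty).contains w)
      (fun i w => (PySem.List.pyGetD (dwMap docs) i PySem.Dict.empty).getD w 0)
      (PySem.Set.ofList (PySem.Str.split₀ r)) _
      (PySem.List.nodup_pyRange_one _ _) _
      (fun i hi => by rw [keys_zdict]; exact hi) j]
  rw [getD_zdict, zero_add]
  by_cases hj : 0 ≤ j ∧ j < (docs.length : Int)
  · rw [if_pos (PySem.List.mem_pyRange_one.2 hj), if_pos hj]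
    rw [dw_at docs j hj.1 hj.2, sum_filter_counter]
    rfl
  · rw [if_neg (fun hmem => hj (PySem.List.mem_pyRange_one.1 hmem)), if_neg hj]

lemma keys_perDict (docs : List String) (r : String) :
    (perDict docs r).keys = PySem.List.pyRange 0 (docs.length : Int) 1 := by
  unfold perDict
  rw [idxFold_keys _ _ _ _ _ (fun i hi => by rw [keys_zdict]; exact hi), keys_zdict]

lemma items_perDict (docs : List String) (r : String) :
    (perDict docs r).items = itemsSpec docs r := by
  rw [PySem.Dict.items_eq_map_keys _ (by rw [keys_perDict]; exact PySem.List.nodup_pyRange_one _ _) 0,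
    keys_perDict]
  unfold itemsSpec
  apply List.map_congr_left
  intro j hj
  rw [perDict_getD, if_pos (PySem.List.mem_pyRange_one.1 hj)]

-- ===== B-side characterization =====
def invD (docs : List String) : PySem.Dict String (PySem.Dict Int Int) :=
  (PySem.List.enumerate docs).foldl (fun inv p =>
    (PySem.Str.split₀ p.2).foldl (fun inv word =>
      inv.modify word PySem.Dict.empty (fun d => d.insert p.1 (d.getD p.1 0 + 1))) inv)
    PySem.Dict.empty

def scoresD (docs : List String) (r : String) : PySem.Dict Int Int :=
  (PySem.Set.ofList (PySem.Str.split₀ r)).foldl (fun sc word =>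
    (((invD docs).getD word PySem.Dict.empty).items).foldl (fun sc q =>
      sc.insert q.1 (sc.getD q.1 0 + q.2)) sc) PySem.Dict.empty

lemma inv_items (docs : List String) (w : String) :
    ((invD docs).getD w PySem.Dict.empty).items
      = ((PySem.List.enumerate docs).filter (fun p => (PySem.Str.split₀ p.2).contains w)).map
          (fun p => (p.1, (List.count w (PySem.Str.split₀ p.2) : Int))) := by
  induction docs using List.reverseRecOn with
  | nil => rfl
  | append_singleton ds doc ih =>
    have hstep : invD (ds ++ [doc]) =
        (PySem.Str.split₀ doc).foldl (fun inv word =>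
          inv.modify word PySem.Dict.empty
            (fun d => d.insert ((ds.length : Int)) (d.getD ((ds.length : Int)) 0 + 1))) (invD ds) := by
      unfold invD
      rw [PySem.List.enumerate_append, List.foldl_append]
      simp [PySem.List.enumerate_cons]
    rw [hstep, invWords_getD]
    have hkeys : ∀ q ∈ ((invD ds).getD w PySem.Dict.empty).keys, q < (ds.length : Int) := by
      intro q hq
      simp only [PySem.Dict.keys, ih, List.map_map] at hq
      rcases List.mem_map.1 hq with ⟨p, hp, hpq⟩
      rcases (PySem.List.mem_enumerate_iff _ _ _).1 (List.mem_filter.1 hp).1 with ⟨k, hk, hpk⟩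
      subst hpk
      simp only [Function.comp] at hpq
      omega
    have hnc : ((invD ds).getD w PySem.Dict.empty).contains ((ds.length : Int)) = false := by
      rcases Bool.eq_false_or_eq_true (((invD ds).getD w PySem.Dict.empty).contains ((ds.length : Int))) with h | h
      · exact absurd (hkeys _ ((PySem.Dict.contains_iff_mem_keys _ _).1 h)) (lt_irrefl _)
      · exact h
    rw [PySem.List.enumerate_append, List.filter_append, List.map_append, ← ih]
    by_cases hc : 0 < List.count w (PySem.Str.split₀ doc)
    · rw [if_pos hc, PySem.Dict.getD_of_not_contains _ _ hnc,
        PySem.Dict.items_insert_of_not_contains _ _ hnc]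
      have hcont : (PySem.Str.split₀ doc).contains w = true := by
        simp only [List.contains_eq_mem, decide_eq_true_eq]
        exact List.count_pos_iff.1 hc
      simp [PySem.List.enumerate_cons, List.count_pos_iff.1 hc]
    · rw [if_neg hc]
      have hcont : (PySem.Str.split₀ doc).contains w = false := by
        simp only [List.contains_eq_mem, decide_eq_false_iff_not]
        intro hm
        exact hc (List.count_pos_iff.2 hm)
      simp [PySem.List.enumerate_cons]
      exact fun hm => hc (List.count_pos_iff.2 hm)

lemma setFold_getD (L : String → List (Int × Int)) :
    ∀ (S : List String) (sc : PySem.Dict Int Int) (j : Int),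
    (S.foldl (fun sc w => (L w).foldl (fun sc q => sc.insert q.1 (sc.getD q.1 0 + q.2)) sc) sc).getD j 0
      = sc.getD j 0 + (S.map (fun w => (((L w).filter (fun q => q.1 == j)).map (·.2)).sum)).sum
  | [], sc, j => by simp
  | w :: t, sc, j => by
      simp only [List.foldl_cons, List.map_cons, List.sum_cons]
      rw [setFold_getD L t _ j, pairFold_getD]
      ring

lemma contrib_eq (docs : List String) (w : String) (j : Int) :
    ((((invD docs).getD w PySem.Dict.empty).items.filter (fun q => q.1 == j)).map (·.2)).sum
      = if 0 ≤ j ∧ j < (docs.length : Int) then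
          ((List.count w (PySem.Str.split₀ (docs.getD j.toNat ""))) : Int)
        else 0 := by
  rw [inv_items, List.filter_map]
  have hcomp : ((fun q : Int × Int => q.1 == j) ∘
      (fun p : Int × String => (p.1, (List.count w (PySem.Str.split₀ p.2) : Int))))
      = fun p : Int × String => p.1 == j := by
    funext p; rfl
  rw [hcomp, List.filter_comm, enum_filter_fst]
  simp only [zero_add, sub_zero]
  by_cases hj : 0 ≤ j ∧ j < (docs.length : Int)
  · rw [dif_pos hj, if_pos hj, List.getD_eq_getElem _ _ (by omega)]
    by_cases hc : (PySem.Str.split₀ (docs[j.toNat]'(by omega))).contains w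
    · have hm : w ∈ PySem.Str.split₀ (docs[j.toNat]'(by omega)) := by simpa using hc
      simp [hm]
    · have hm : w ∉ PySem.Str.split₀ (docs[j.toNat]'(by omega)) := fun hm => hc (by simpa using hm)
      have h0 : List.count w (PySem.Str.split₀ (docs[j.toNat]'(by omega))) = 0 :=
        List.count_eq_zero.2 hm
      simp [hm, h0]
  · rw [dif_neg hj, if_neg hj]
    simp

lemma scores_getD (docs : List String) (r : String) (j : Int) :
    (scoresD docs r).getD j 0
      = if 0 ≤ j ∧ j < (docs.length : Int) then scoreAt docs r j else 0 := by
  unfold scoresD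
  rw [setFold_getD]
  rw [PySem.Dict.getD_empty, zero_add]
  by_cases hj : 0 ≤ j ∧ j < (docs.length : Int)
  · rw [if_pos hj]
    unfold scoreAt
    congr 1
    apply List.map_congr_left
    intro w _
    rw [contrib_eq, if_pos hj]
  · rw [if_neg hj]
    have : ∀ w ∈ PySem.Set.ofList (PySem.Str.split₀ r),
        ((((invD docs).getD w PySem.Dict.empty).items.filter (fun q => q.1 == j)).map (·.2)).sum = 0 := by
      intro w _
      rw [contrib_eq, if_neg hj]
    rw [List.map_congr_left (fun w hw => this w hw)]
    simp

lemma setFold_keys (L : String → List (Int × Int)) :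
    ∀ (S : List String) (sc : PySem.Dict Int Int) (j : Int),
    j ∈ (S.foldl (fun sc w => (L w).foldl (fun sc q => sc.insert q.1 (sc.getD q.1 0 + q.2)) sc) sc).keys
      ↔ j ∈ sc.keys ∨ ∃ w ∈ S, j ∈ (L w).map (·.1)
  | [], sc, j => by simp
  | w :: t, sc, j => by
      simp only [List.foldl_cons]
      rw [setFold_keys L t _ j]
      rw [PySem.Dict.keys_foldl_insert_key _ (fun q : Int × Int => q.1)]
      rw [PySem.Set.mem_update]
      constructor
      · rintro ((h | h) | h)
        · exact Or.inl h
        · exact Or.inr ⟨w, List.mem_cons_self .., h⟩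
        · rcases h with ⟨w', hw', hj⟩
          exact Or.inr ⟨w', List.mem_cons_of_mem _ hw', hj⟩
      · rintro (h | ⟨w', hw', hj⟩)
        · exact Or.inl (Or.inl h)
        · rcases List.mem_cons.1 hw' with h | h
          · subst h; exact Or.inl (Or.inr hj)
          · exact Or.inr ⟨w', h, hj⟩

lemma setFold_nodup (L : String → List (Int × Int)) :
    ∀ (S : List String) (sc : PySem.Dict Int Int), sc.keys.Nodup →
    (S.foldl (fun sc w => (L w).foldl (fun sc q => sc.insert q.1 (sc.getD q.1 0 + q.2)) sc) sc).keys.Nodup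
  | [], sc, h => h
  | w :: t, sc, h => by
      simp only [List.foldl_cons]
      exact setFold_nodup L t _
        (PySem.Dict.nodup_keys_foldl_insert_key _ (fun q : Int × Int => q.1) _ _ h)

lemma mem_keys_scoresD (docs : List String) (r : String) (j : Int) :
    j ∈ (scoresD docs r).keys
      ↔ (0 ≤ j ∧ j < (docs.length : Int)) ∧
        ∃ w ∈ PySem.Set.ofList (PySem.Str.split₀ r),
          0 < List.count w (PySem.Str.split₀ (docs.getD j.toNat "")) := by
  unfold scoresD
  rw [setFold_keys]
  simp only [PySem.Dict.keys_empty, List.not_mem_nil, false_or]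
  constructor
  · rintro ⟨w, hw, hj⟩
    rw [inv_items, List.map_map] at hj
    rcases List.mem_map.1 hj with ⟨p, hp, hpj⟩
    rcases List.mem_filter.1 hp with ⟨hpe, hpc⟩
    rcases (PySem.List.mem_enumerate_iff _ _ _).1 hpe with ⟨k, hk, hpk⟩
    subst hpk
    simp only [Function.comp] at hpj
    have hjk : j = (k : Int) := by simpa using hpj.symm
    subst hjk
    refine ⟨⟨by omega, by omega⟩, w, hw, ?_⟩
    simp only [Int.toNat_natCast]
    rw [List.getD_eq_getElem _ _ (by omega)]
    exact List.count_pos_iff.2 (by simpa using hpc)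
  · rintro ⟨⟨h0, h1⟩, w, hw, hcnt⟩
    refine ⟨w, hw, ?_⟩
    rw [inv_items, List.map_map]
    apply List.mem_map.2
    refine ⟨(j, docs[j.toNat]'(by omega)), ?_, by simp [Function.comp]⟩
    apply List.mem_filter.2
    constructor
    · apply (PySem.List.mem_enumerate_iff _ _ _).2
      exact ⟨j.toNat, by omega, by simp; omega⟩
    · rw [List.getD_eq_getElem _ _ (by omega)] at hcnt
      simp only [List.contains_eq_mem, decide_eq_true_eq]
      exact List.count_pos_iff.1 hcnt

lemma nodup_keys_scoresD (docs : List String) (r : String) : (scoresD docs r).keys.Nodup := by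
  unfold scoresD
  exact setFold_nodup _ _ _ (by simp [PySem.Dict.keys_empty])

lemma items_scoresD (docs : List String) (r : String) :
    (scoresD docs r).items = (scoresD docs r).keys.map (fun j => (j, scoreAt docs r j)) := by
  rw [PySem.Dict.items_eq_map_keys _ (nodup_keys_scoresD docs r) 0]
  apply List.map_congr_left
  intro j hj
  rw [scores_getD, if_pos ((mem_keys_scoresD docs r j).1 hj).1]

lemma scoreAt_pos_iff (docs : List String) (r : String) (j : Int) :
    0 < scoreAt docs r j
      ↔ ∃ w ∈ PySem.Set.ofList (PySem.Str.split₀ r),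
          0 < List.count w (PySem.Str.split₀ (docs.getD j.toNat "")) := by
  unfold scoreAt
  constructor
  · intro hpos
    by_contra hno
    push Not at hno
    have hz : ∀ x ∈ (PySem.Set.ofList (PySem.Str.split₀ r)).map
        (fun w => ((List.count w (PySem.Str.split₀ (docs.getD j.toNat ""))) : Int)), x = 0 := by
      intro x hx
      rcases List.mem_map.1 hx with ⟨w, hw, hwx⟩
      have := hno w hw
      omega
    rw [List.sum_eq_zero hz] at hpos
    exact absurd hpos (lt_irrefl 0)
  · rintro ⟨w, hw, hcnt⟩
    apply sum_pos_of_mem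
    · intro x hx
      rcases List.mem_map.1 hx with ⟨w', _, hwx⟩
      subst hwx
      positivity
    · exact List.mem_map.2 ⟨w, hw, rfl⟩
    · exact_mod_cast hcnt

lemma sortBridge (docs : List String) (r : String) :
    ((PySem.List.sorted2 (itemsSpec docs r) (fun item => -item.2) (fun item => item.1)).filter
        (fun item => item.2 > 0))
      = PySem.List.sorted2 (scoresD docs r).items (fun item => -item.2) (fun item => item.1) := by
  rw [sorted2_eq_sorted_toLex _ _ _ (fun a b => boolLex (-a.2) (-b.2) a.1 b.1),
    sorted2_eq_sorted_toLex _ _ _ (fun a b => boolLex (-a.2) (-b.2) a.1 b.1)]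
  have hKinj : ∀ a b : Int × Int, (toLex (-a.2, a.1) = toLex (-b.2, b.1)) → a.1 = b.1 := by
    intro a b h
    have := congrArg (fun x => (ofLex x).2) h
    simpa using this
  have hpwA : (itemsSpec docs r).Pairwise (fun a b => a.1 < b.1) := by
    unfold itemsSpec
    rw [List.pairwise_map]
    exact PySem.List.pairwise_lt_pyRange_one 0 _
  have hndA : (itemsSpec docs r).Nodup :=
    hpwA.imp (fun h hEq => absurd (hEq ▸ h) (by simp))
  have hpermS := PySem.List.sorted_perm (itemsSpec docs r) (fun x => toLex (-x.2, x.1)) false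
  have hndS : (PySem.List.sorted (itemsSpec docs r) (fun x => toLex (-x.2, x.1))).Nodup :=
    hpermS.nodup_iff.2 hndA
  have hneS : (PySem.List.sorted (itemsSpec docs r) (fun x => toLex (-x.2, x.1))).Pairwise
      (fun a b => a.1 ≠ b.1) :=
    (List.Perm.pairwise_iff (fun h => Ne.symm h) hpermS).2 (hpwA.imp ne_of_lt)
  have hleS := PySem.List.sorted_pairwise (itemsSpec docs r) (fun x => toLex (-x.2, x.1))
  have hltS : (PySem.List.sorted (itemsSpec docs r) (fun x => toLex (-x.2, x.1))).Pairwise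
      (fun a b => (toLex (-a.2, a.1)) < toLex (-b.2, b.1)) :=
    (hleS.and hneS).imp (fun ⟨hle, hne⟩ => lt_of_le_of_ne hle (fun hK => hne (hKinj _ _ hK)))
  set LA := (PySem.List.sorted (itemsSpec docs r) (fun x => toLex (-x.2, x.1))).filter
      (fun item => item.2 > 0) with hLA
  have hLApw : LA.Pairwise (fun a b => (toLex (-a.2, a.1)) < toLex (-b.2, b.1)) :=
    hltS.sublist List.filter_sublist
  have hLAnd : LA.Nodup := hndS.sublist List.filter_sublist
  have hndB : ((scoresD docs r).items).Nodup := by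
    rw [items_scoresD]
    exact (nodup_keys_scoresD docs r).map (fun a b h => congrArg Prod.fst h)
  have hmem : ∀ a : Int × Int, a ∈ LA ↔ a ∈ (scoresD docs r).items := by
    intro a
    rw [hLA, List.mem_filter, PySem.List.mem_sorted, items_scoresD]
    constructor
    · rintro ⟨hmA, hpos⟩
      rcases List.mem_map.1 hmA with ⟨j, hj, hja⟩
      subst hja
      have hb := PySem.List.mem_pyRange_one.1 hj
      have hpos' : 0 < scoreAt docs r j := by simpa using hpos
      apply List.mem_map.2
      exact ⟨j, (mem_keys_scoresD docs r j).2 ⟨hb, (scoreAt_pos_iff docs r j).1 hpos'⟩, rfl⟩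
    · intro hmB
      rcases List.mem_map.1 hmB with ⟨j, hj, hja⟩
      subst hja
      rcases (mem_keys_scoresD docs r j).1 hj with ⟨hb, hex⟩
      constructor
      · unfold itemsSpec
        exact List.mem_map.2 ⟨j, PySem.List.mem_pyRange_one.2 hb, rfl⟩
      · simpa using (scoreAt_pos_iff docs r j).2 hex
  have hperm : LA.Perm ((scoresD docs r).items) :=
    (List.perm_ext_iff_of_nodup hLAnd hndB).2 hmem
  exact (PySem.List.sorted_eq_of_perm_of_pairwise_lt _ _ _ hperm hLApw).symm

lemma map_pyGetD_all {α β : Type} (xs : List α) (d : α) (f : α → β) :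
    (PySem.List.pyRange 0 ((xs.length : Int)) 1).map (fun i => f (PySem.List.pyGetD xs i d))
      = xs.map f := by
  have h := PySem.List.map_pyGetD_pyRange_zero' (xs := xs) (d := d)
  calc (PySem.List.pyRange 0 ((xs.length : Int)) 1).map (fun i => f (PySem.List.pyGetD xs i d))
      = ((PySem.List.pyRange 0 ((xs.length : Int)) 1).map (fun j => PySem.List.pyGetD xs j d)).map f := by
        rw [List.map_map]; rfl
    _ = xs.map f := by rw [h]

lemma render_eq (elt : List Int) :
    (if 5 ≤ elt.length then
       PySem.Str.join " " ((PySem.List.pyRange 0 5 1).map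
         (fun i => PySem.Int.toStr (PySem.List.pyGetD elt i 0)))
     else
       PySem.Str.join " " ((PySem.List.pyRange 0 ((elt.length : Int)) 1).map
         (fun i => PySem.Int.toStr (PySem.List.pyGetD elt i 0))))
    = PySem.Str.join " " ((elt.take 5).map PySem.Int.toStr) := by
  by_cases h5 : 5 ≤ elt.length
  · rw [if_pos h5]
    have hc : ((5 : Nat) : Int) = (5 : Int) := by norm_num
    rw [← hc, map_pyGetD_take _ 5 elt h5]
  · rw [if_neg h5]
    rw [map_pyGetD_take _ elt.length elt le_rfl, List.take_length,
      List.take_of_length_le (by omega)]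
def canonLine (docs : List String) (r : String) : String :=
  PySem.Str.join " " (((PySem.List.sorted2 (scoresD docs r).items
      (fun item => -item.2) (fun item => item.1)).take 5).map
    (fun q => PySem.Int.toStr (q.1 + 1)))

lemma searchB_eq (docs requests : List String) :
    search_alt docs requests = PySem.Str.join "\n" (requests.map (canonLine docs)) := rfl

lemma lineA_eq (docs : List String) (r : String) :
    (if 5 ≤ (((PySem.List.sorted2 (perDict docs r).items (fun item => -item.2)
          (fun item => item.1)).filter (fun item => item.2 > 0)).map (fun item => item.1 + 1)).length
     then
       PySem.Str.join " " ((PySem.List.pyRange 0 5 1).map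
         (fun i => PySem.Int.toStr (PySem.List.pyGetD (((PySem.List.sorted2 (perDict docs r).items
           (fun item => -item.2) (fun item => item.1)).filter (fun item => item.2 > 0)).map
             (fun item => item.1 + 1)) i 0)))
     else
       PySem.Str.join " " ((PySem.List.pyRange 0
           (((((PySem.List.sorted2 (perDict docs r).items (fun item => -item.2)
             (fun item => item.1)).filter (fun item => item.2 > 0)).map
               (fun item => item.1 + 1)).length : Int)) 1).map
         (fun i => PySem.Int.toStr (PySem.List.pyGetD (((PySem.List.sorted2 (perDict docs r).items
           (fun item => -item.2) (fun item => item.1)).filter (fun item => item.2 > 0)).map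
             (fun item => item.1 + 1)) i 0))))
    = canonLine docs r := by
  rw [render_eq, items_perDict, sortBridge]
  rw [← List.map_take, List.map_map]
  rfl

lemma searchA_eq (docs requests : List String) :
    search docs requests = PySem.Str.join "\n" (requests.map (canonLine docs)) := by
  unfold search
  simp only [PySem.List.len_eq]
  rw [docsWords_eq]
  rw [show (PySem.List.pyRange 0 ((docs.length : Int)) 1).foldl
      (fun d i => d.insert i 0) PySem.Dict.empty = zdict ((docs.length : Int)) from rfl]
  rw [result_eq]
  rw [map_pyGetD_all (requests.map (perDict docs)) PySem.Dict.empty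
    (fun d => List.map (fun item => item.1 + 1)
      (List.filter (fun item => decide (item.2 > 0))
        (PySem.List.sorted2 d.items (fun item => -item.2) (fun item => item.1))))]
  rw [List.map_map, List.map_map]
  refine congrArg (PySem.Str.join "\n") (List.map_congr_left (fun r _ => lineA_eq docs r))

-- ===== VERDICT (by name: the statement is the Claim_ definition above) =====
theorem search_spec : Claim_equal_search := by
  intro docs requests _
  unfold Spec_search
  rw [searchA_eq, searchB_eq]
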